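-- pv_equiv track=rewrite | github.com/hwijeen/Autonomous-Delivery | order_simulator/Scheduling_v5.py | get_loading_order
-- ===== SOURCE A (Python) =====
-- def get_loading_order(scheduled_list):
--     if scheduled_list:
--         cube_to_loaded = {'red': 0, 'green': 0, 'blue': 0}
--
--         for schedule_ in scheduled_list:
--             cube_to_loaded['red'] += schedule_['red']
--             cube_to_loaded['green'] += schedule_['green']
--             cube_to_loaded['blue'] += schedule_['blue']
--
--     return cube_to_loaded
-- ===== SOURCE B (Python) =====
-- def get_loading_order(scheduled_list):
--     if scheduled_list:
--         result = {color: sum(s[color] for s in scheduled_list)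
--                   for color in ('red', 'green', 'blue')}
--     return result
-- ===== Notes on version B (the rewrite author's own statement) =====
-- stated objective: simpler
-- what changed: B replaces A's single loop with three interleaved dict-entry accumulations by one per-color dict comprehension, summing each color in its own pass over the list.
import Mathlib
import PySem

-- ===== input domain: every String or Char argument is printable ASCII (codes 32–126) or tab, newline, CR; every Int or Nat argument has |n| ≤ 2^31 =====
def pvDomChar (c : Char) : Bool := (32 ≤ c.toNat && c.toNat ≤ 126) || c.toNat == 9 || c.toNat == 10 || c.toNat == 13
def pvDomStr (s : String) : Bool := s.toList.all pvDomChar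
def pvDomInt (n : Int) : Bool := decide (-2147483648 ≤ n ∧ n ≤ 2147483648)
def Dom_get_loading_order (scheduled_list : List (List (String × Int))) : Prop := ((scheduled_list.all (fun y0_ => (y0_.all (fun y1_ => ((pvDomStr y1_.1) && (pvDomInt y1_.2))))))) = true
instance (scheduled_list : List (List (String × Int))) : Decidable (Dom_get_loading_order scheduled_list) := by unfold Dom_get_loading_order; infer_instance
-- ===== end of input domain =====

-- B changes only the decomposition (one per-color pass instead of one combined loop); return values identical on Pre_.

-- schedule_[color] in A: first-match association-list lookup; default 0 is only
-- reached on inputs Pre_ excludes (Python would raise KeyError there).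
def pvKeyGetA (s : List (String × Int)) (k : String) : Int :=
  ((s.find? (fun p => p.1 == k)).map Prod.snd).getD 0

-- s[color] in B: same Python construct, transliterated separately for B's port
def pvKeyGetB (s : List (String × Int)) (k : String) : Int :=
  ((s.find? (fun p => p.1 == k)).map Prod.snd).getD 0

-- the loop body of A (one element: bump the three dict entries)
def pvStepA (d : PySem.Dict String Int) (s : List (String × Int)) : PySem.Dict String Int :=
  let d := PySem.Dict.insert d "red" (PySem.Dict.getD d "red" 0 + pvKeyGetA s "red")
  let d := PySem.Dict.insert d "green" (PySem.Dict.getD d "green" 0 + pvKeyGetA s "green")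
  PySem.Dict.insert d "blue" (PySem.Dict.getD d "blue" 0 + pvKeyGetA s "blue")

-- ===== PORT A =====
-- one loop, three dict entries updated in place per element
def get_loading_order (scheduled_list : List (List (String × Int))) : List (String × Int) :=
  if scheduled_list.isEmpty then []   -- Python: cube_to_loaded never assigned, UnboundLocalError (outside Pre_)
  else
    (scheduled_list.foldl pvStepA
      (PySem.Dict.mk [("red", 0), ("green", 0), ("blue", 0)])).items

-- ===== PORT B =====
-- per-color dict comprehension: one independent summing pass for each color
def get_loading_order_alt (scheduled_list : List (List (String × Int))) : List (String × Int) :=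
  if scheduled_list.isEmpty then []   -- Python: result never assigned, UnboundLocalError (outside Pre_)
  else
    ["red", "green", "blue"].map
      (fun color => (color, (scheduled_list.map (fun s => pvKeyGetB s color)).sum))

-- ===== PRECONDITION & SPEC =====
-- Pre_ excludes exactly the inputs where A raises: the empty list (UnboundLocalError)
-- and schedules missing one of the keys 'red'/'green'/'blue' (KeyError).
def Pre_get_loading_order (scheduled_list : List (List (String × Int))) : Prop :=
  scheduled_list ≠ [] ∧
  (scheduled_list.all (fun s =>
    ["red", "green", "blue"].all (fun c => s.any (fun p => p.1 == c)))) = true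

instance (scheduled_list : List (List (String × Int))) : Decidable (Pre_get_loading_order scheduled_list) := by
  unfold Pre_get_loading_order; infer_instance

def pvWitness_get_loading_order : (List (List (String × Int))) :=
  [[("red", 1), ("green", 2), ("blue", 3)]]

def Spec_get_loading_order (scheduled_list : List (List (String × Int))) (out : List (String × Int)) : Prop := out = get_loading_order_alt scheduled_list
instance (scheduled_list : List (List (String × Int))) (out : List (String × Int)) : Decidable (Spec_get_loading_order scheduled_list out) := by unfold Spec_get_loading_order; infer_instance

-- ===== CLAIM (what is proved, stated in full; the proofs are below) =====
def Claim_equal_get_loading_order : Prop := ∀ (scheduled_list : List (List (String × Int))), Dom_get_loading_order scheduled_list → Pre_get_loading_order scheduled_list → Spec_get_loading_order scheduled_list (get_loading_order scheduled_list)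

-- ===== LEMMAS AND PROOFS =====

-- loop invariant: A's fold over a three-key literal dict accumulates exactly B's three per-color sums
lemma pv_step (s : List (String × Int)) (r g b : Int) :
    pvStepA (PySem.Dict.mk [("red", r), ("green", g), ("blue", b)]) s
      = PySem.Dict.mk [("red", r + pvKeyGetA s "red"), ("green", g + pvKeyGetA s "green"),
                       ("blue", b + pvKeyGetA s "blue")] := by
  simp [pvStepA, PySem.Dict.insert, PySem.Dict.getD, PySem.Dict.get?]

-- loop invariant: A's fold over the three-key literal dict accumulates exactly B's three per-color sums
lemma pv_loop (sl : List (List (String × Int))) :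
    ∀ r g b : Int,
      sl.foldl pvStepA (PySem.Dict.mk [("red", r), ("green", g), ("blue", b)])
      = PySem.Dict.mk
          [("red", r + (sl.map (fun s => pvKeyGetA s "red")).sum),
           ("green", g + (sl.map (fun s => pvKeyGetA s "green")).sum),
           ("blue", b + (sl.map (fun s => pvKeyGetA s "blue")).sum)] := by
  induction sl with
  | nil => intro r g b; simp
  | cons s tl ih =>
      intro r g b
      rw [List.foldl_cons, pv_step, ih]
      simp [add_assoc]

lemma pv_keyGet_eq : pvKeyGetA = pvKeyGetB := rfl

-- ===== VERDICT (by name: the statement is the Claim_ definition above) =====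
theorem get_loading_order_spec : Claim_equal_get_loading_order := by
  intro sl _ hpre
  unfold Spec_get_loading_order get_loading_order get_loading_order_alt
  rw [if_neg (by simp [hpre.1]), if_neg (by simp [hpre.1]), pv_loop]
  simp [pv_keyGet_eq]
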